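-- pv_equiv track=rewrite | github.com/gilad23099/guarding-system-1 | shiftschedule/views.py | build_heap_of_shifts
-- ===== SOURCE A (Python) =====
-- import heapq
--
-- def build_heap_of_shifts(guard_availability,num_of_empty_guards,day_or_night):
--     heap_of_shifts=[]
--     count=0
--     if day_or_night=="day":
--         for i in range(len(guard_availability)-num_of_empty_guards):
--             for availabilty_set in guard_availability:
--                 if i in availabilty_set:
--                     count+=1
--             heapq.heappush(heap_of_shifts, (count,i))  #(3-num of guards that can guard AT SHIFT NUMBER 0, 0-shift)
--             count=0
--     else:
--         for i in range((len(guard_availability)-num_of_empty_guards)//2):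
--             for availabilty_set in guard_availability:
--                 if i in availabilty_set:
--                     count+=1
--             heapq.heappush(heap_of_shifts, (count,i))  #(3-num of guards that can guard AT SHIFT NUMBER 0, 0-shift)
--             count=0
--     return heap_of_shifts
-- ===== SOURCE B (Python) =====
-- import heapq
--
-- def build_heap_of_shifts(guard_availability, num_of_empty_guards, day_or_night):
--     # One pass over all availability sets builds a frequency
--     # table; then the heap is built by the same sequence of heappushes.
--     n = len(guard_availability) - num_of_empty_guards
--     num_shifts = n if day_or_night == "day" else n // 2
--     freq = [0] * max(num_shifts, 0)
--     for availability_set in guard_availability: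
--         for e in availability_set:
--             if 0 <= e < num_shifts:
--                 freq[e] += 1
--     heap_of_shifts = []
--     for i in range(num_shifts):
--         heapq.heappush(heap_of_shifts, (freq[i], i))
--     return heap_of_shifts
-- ===== Notes on version B (the rewrite author's own statement) =====
-- stated objective: alternative
-- what changed: B replaces A's per-shift rescan of every availability set (for each i, loop over all sets testing membership) with a single pass that builds a frequency table freq[e] for all in-range elements, then pushes (freq[i], i) in the same order; measured cost is similar since Python set membership is O(1).
import Mathlib
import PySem

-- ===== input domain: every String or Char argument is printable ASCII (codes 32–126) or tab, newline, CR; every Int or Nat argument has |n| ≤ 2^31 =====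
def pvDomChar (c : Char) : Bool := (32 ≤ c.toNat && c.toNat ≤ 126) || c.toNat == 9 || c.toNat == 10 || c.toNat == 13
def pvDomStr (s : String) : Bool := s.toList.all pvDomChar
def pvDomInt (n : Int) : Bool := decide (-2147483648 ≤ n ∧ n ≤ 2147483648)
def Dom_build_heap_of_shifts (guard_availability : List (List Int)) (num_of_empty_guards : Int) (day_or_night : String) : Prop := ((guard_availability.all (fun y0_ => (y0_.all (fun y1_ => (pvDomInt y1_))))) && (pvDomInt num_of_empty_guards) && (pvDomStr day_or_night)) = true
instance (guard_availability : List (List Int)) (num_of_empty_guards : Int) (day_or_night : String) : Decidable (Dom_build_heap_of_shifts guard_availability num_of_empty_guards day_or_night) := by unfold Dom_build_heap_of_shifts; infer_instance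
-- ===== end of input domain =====

-- B replaces A's per-shift rescan of every availability set with one frequency-table pass; same heappush order, identical return value.

-- shared helper: CPython heapq.heappush (append, then sift the new item up), used by both Pythons
def pvTupLt (a b : Int × Int) : Bool := a.1 < b.1 || (a.1 == b.1 && a.2 < b.2)

def pvSiftdown (h : List (Int × Int)) (pos : Nat) (item : Int × Int) : List (Int × Int) :=
  if hp : pos = 0 then h.set 0 item
  else
    let parent := (pos - 1) / 2
    let pv := h.getD parent (0, 0)
    if pvTupLt item pv then pvSiftdown (h.set pos pv) parent item
    else h.set pos item
termination_by pos
decreasing_by omega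

def pvHeappush (h : List (Int × Int)) (item : Int × Int) : List (Int × Int) :=
  pvSiftdown (h ++ [item]) h.length item

-- ===== PORT A =====
def build_heap_of_shifts (guard_availability : List (List Int)) (num_of_empty_guards : Int) (day_or_night : String) : List (Int × Int) :=
  if day_or_night = "day" then
    (PySem.List.pyRange 0 ((guard_availability.length : Int) - num_of_empty_guards) 1).foldl
      (fun heap i =>
        let count := guard_availability.foldl (fun c s => if s.contains i then c + 1 else c) (0 : Int)
        pvHeappush heap (count, i)) []
  else
    (PySem.List.pyRange 0 (PySem.Int.floordiv ((guard_availability.length : Int) - num_of_empty_guards) 2) 1).foldl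
      (fun heap i =>
        let count := guard_availability.foldl (fun c s => if s.contains i then c + 1 else c) (0 : Int)
        pvHeappush heap (count, i)) []

-- ===== PORT B =====
def build_heap_of_shifts_alt (guard_availability : List (List Int)) (num_of_empty_guards : Int) (day_or_night : String) : List (Int × Int) :=
  let n : Int := (guard_availability.length : Int) - num_of_empty_guards
  let numShifts : Int := if day_or_night = "day" then n else PySem.Int.floordiv n 2
  let freq : List Int :=
    guard_availability.foldl
      (fun f s => s.foldl
        (fun f e => if 0 ≤ e ∧ e < numShifts then f.set e.toNat (f.getD e.toNat 0 + 1) else f) f)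
      (List.replicate (max numShifts 0).toNat (0 : Int))
  (PySem.List.pyRange 0 numShifts 1).foldl
    (fun heap i => pvHeappush heap (freq.getD i.toNat 0, i)) []

-- ===== PRECONDITION & SPEC =====
-- Pre_ requires each inner list to have distinct elements: in the Python the availability
-- collections are sets, which cannot hold duplicates, so duplicate-bearing lists encode no
-- Python input (A's membership test would count a duplicated element once, B's table twice).
def Pre_build_heap_of_shifts (guard_availability : List (List Int)) (num_of_empty_guards : Int) (day_or_night : String) : Prop :=
  ∀ s ∈ guard_availability, s.Nodup
instance (guard_availability : List (List Int)) (num_of_empty_guards : Int) (day_or_night : String) : Decidable (Pre_build_heap_of_shifts guard_availability num_of_empty_guards day_or_night) := by unfold Pre_build_heap_of_shifts; infer_instance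

def pvWitness_build_heap_of_shifts : List (List Int) × Int × String := ([[0, 1], [1]], 0, "day")

def Spec_build_heap_of_shifts (guard_availability : List (List Int)) (num_of_empty_guards : Int) (day_or_night : String) (out : List (Int × Int)) : Prop := out = build_heap_of_shifts_alt guard_availability num_of_empty_guards day_or_night
instance (guard_availability : List (List Int)) (num_of_empty_guards : Int) (day_or_night : String) (out : List (Int × Int)) : Decidable (Spec_build_heap_of_shifts guard_availability num_of_empty_guards day_or_night out) := by unfold Spec_build_heap_of_shifts; infer_instance

-- ===== CLAIM (what is proved, stated in full; the proofs are below) =====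
def Claim_equal_build_heap_of_shifts : Prop := ∀ (guard_availability : List (List Int)) (num_of_empty_guards : Int) (day_or_night : String), Dom_build_heap_of_shifts guard_availability num_of_empty_guards day_or_night → Pre_build_heap_of_shifts guard_availability num_of_empty_guards day_or_night → Spec_build_heap_of_shifts guard_availability num_of_empty_guards day_or_night (build_heap_of_shifts guard_availability num_of_empty_guards day_or_night)

-- ===== LEMMAS AND PROOFS =====

-- one bump step of B's table
def pvBump (bound : Int) (f : List Int) (e : Int) : List Int :=
  if 0 ≤ e ∧ e < bound then f.set e.toNat (f.getD e.toNat 0 + 1) else f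

theorem pvBump_length (bound : Int) (f : List Int) (e : Int) :
    (pvBump bound f e).length = f.length := by
  unfold pvBump; split_ifs <;> simp

theorem pvBump_foldl_length (bound : Int) (s : List Int) (f : List Int) :
    (s.foldl (pvBump bound) f).length = f.length := by
  induction s generalizing f with
  | nil => rfl
  | cons e t ih => simp [List.foldl, ih, pvBump_length]

theorem pvBump_getD_ne (bound : Int) (f : List Int) (e j : Int) (hj : 0 ≤ j) (hne : e ≠ j) :
    (pvBump bound f e).getD j.toNat 0 = f.getD j.toNat 0 := by
  unfold pvBump
  split_ifs with hg
  · have : e.toNat ≠ j.toNat := by omega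
    simp [List.getD, this]
  · rfl

theorem pvBump_getD_self (bound : Int) (f : List Int) (j : Int)
    (h0 : 0 ≤ j) (hb : j < bound) (hl : j.toNat < f.length) :
    (pvBump bound f j).getD j.toNat 0 = f.getD j.toNat 0 + 1 := by
  unfold pvBump
  have hg : 0 ≤ j ∧ j < bound := ⟨h0, hb⟩
  simp [hg, List.getD, hl]

theorem pvInner_getD (bound : Int) (s : List Int) (f : List Int) (j : Int)
    (h0 : 0 ≤ j) (hb : j < bound) (hl : j.toNat < f.length) (hnd : s.Nodup) :
    (s.foldl (pvBump bound) f).getD j.toNat 0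
      = f.getD j.toNat 0 + (if s.contains j then 1 else 0) := by
  induction s generalizing f with
  | nil => simp
  | cons e t ih =>
    have hndt : t.Nodup := hnd.of_cons
    by_cases he : e = j
    · subst he
      have hnotin : e ∉ t := (List.nodup_cons.mp hnd).1
      have hl' : e.toNat < (pvBump bound f e).length := by rw [pvBump_length]; exact hl
      simp only [List.foldl_cons]
      rw [ih _ hl' hndt]
      rw [pvBump_getD_self bound f e h0 hb hl]
      have h1 : t.contains e = false := by simpa using hnotin
      have h2 : (e :: t).contains e = true := by simp
      rw [h1, h2]
      simp
    · have hl' : j.toNat < (pvBump bound f e).length := by rw [pvBump_length]; exact hl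
      simp only [List.foldl_cons]
      rw [ih _ hl' hndt]
      rw [pvBump_getD_ne bound f e j h0 he]
      have hje : (j == e) = false := by simp [Ne.symm he]
      have : (e :: t).contains j = t.contains j := by
        simp only [List.contains_cons, hje, Bool.false_or]
      rw [this]

theorem pvOuter_getD (bound : Int) (ga : List (List Int)) (f : List Int) (j : Int)
    (h0 : 0 ≤ j) (hb : j < bound) (hl : j.toNat < f.length) (hnd : ∀ s ∈ ga, s.Nodup) :
    (ga.foldl (fun f s => s.foldl (pvBump bound) f) f).getD j.toNat 0
      = f.getD j.toNat 0 + (ga.countP (fun s => s.contains j) : Int) := by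
  induction ga generalizing f with
  | nil => simp
  | cons s t ih =>
    have hl' : j.toNat < (s.foldl (pvBump bound) f).length := by
      rw [pvBump_foldl_length]; exact hl
    simp only [List.foldl_cons]
    rw [ih _ hl' (fun x hx => hnd x (List.mem_cons_of_mem _ hx))]
    rw [pvInner_getD bound s f j h0 hb hl (hnd s (List.mem_cons_self))]
    rw [List.countP_cons]
    split_ifs with h <;> push_cast <;> ring

theorem pvFreq_getD (bound : Int) (ga : List (List Int)) (j : Int)
    (h0 : 0 ≤ j) (hb : j < bound) (hnd : ∀ s ∈ ga, s.Nodup) :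
    (ga.foldl (fun f s => s.foldl (pvBump bound) f)
        (List.replicate (max bound 0).toNat (0 : Int))).getD j.toNat 0
      = (ga.countP (fun s => s.contains j) : Int) := by
  have hl : j.toNat < (List.replicate (max bound 0).toNat (0 : Int)).length := by
    simp; omega
  rw [pvOuter_getD bound ga _ j h0 hb hl hnd]
  simp [List.getD, show j.toNat < (max bound 0).toNat by omega]

theorem pvMain (ga : List (List Int)) (bound : Int) (hnd : ∀ s ∈ ga, s.Nodup) :
    (PySem.List.pyRange 0 bound 1).foldl
      (fun heap i =>
        let count := ga.foldl (fun c s => if s.contains i then c + 1 else c) (0 : Int)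
        pvHeappush heap (count, i)) []
    = (PySem.List.pyRange 0 bound 1).foldl
      (fun heap i =>
        pvHeappush heap
          ((ga.foldl (fun f s => s.foldl (pvBump bound) f)
              (List.replicate (max bound 0).toNat (0 : Int))).getD i.toNat 0, i)) [] := by
  apply PySem.List.foldl_congr_mem
  intro acc i hi
  have hmem := (PySem.List.mem_pyRange_one).mp hi
  have hcnt : ga.foldl (fun c s => if s.contains i then c + 1 else c) (0 : Int)
      = (ga.countP (fun s => s.contains i) : Int) := by
    rw [PySem.List.foldl_if_add_one]; ring
  simp only [hcnt]
  rw [pvFreq_getD bound ga i hmem.1 hmem.2 hnd]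

-- ===== VERDICT (by name: the statement is the Claim_ definition above) =====
theorem build_heap_of_shifts_spec : Claim_equal_build_heap_of_shifts := by
  intro ga num dn _hdom hpre
  unfold Spec_build_heap_of_shifts build_heap_of_shifts build_heap_of_shifts_alt
  by_cases hd : dn = "day" <;>
    simp only [hd, if_true, if_false] <;>
    exact pvMain ga _ hpre
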